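-- pv_equiv track=rewrite | github.com/lumijiez/discretemath-labs | LabMD_2/rsa.py | unhashMessage
-- ===== SOURCE A (Python) =====
-- letterHashmapReverse = {
--     10: 'A',
--     11: 'B',
--     12: 'C',
--     13: 'D',
--     14: 'E',
--     15: 'F',
--     16: 'G',
--     17: 'H',
--     18: 'I',
--     19: 'J',
--     20: 'K',
--     21: 'L',
--     22: 'M',
--     23: 'N',
--     24: 'O',
--     25: 'P',
--     26: 'Q',
--     27: 'R',
--     28: 'S',
--     29: 'T',
--     30: 'U',
--     31: 'V',
--     32: 'W',
--     33: 'X',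
--     34: 'Y',
--     35: 'Z',
--     36: ' '
-- }
--
-- def unhashMessage(msg):
--     letters = []
--     while msg > 10:
--         if msg % 100 in letterHashmapReverse:
--             letters.append(letterHashmapReverse[msg % 100])
--         msg = msg // 100
--     strn = ''.join(letters)
--     strn = strn[::-1]
--     return strn
-- ===== SOURCE B (Python) =====
-- def unhashMessage(msg):
--     if msg <= 10:
--         return ''
--     c = msg % 100
--     if 10 <= c <= 35:
--         ch = chr(ord('A') + c - 10)
--     elif c == 36:
--         ch = ' '
--     else:
--         ch = ''
--     return unhashMessage(msg // 100) + ch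
-- ===== Notes on version B (the rewrite author's own statement) =====
-- stated objective: alternative
-- what changed: Replaces the append-then-reverse while-loop over the lookup table by a direct recursion on the quotient that emits higher-significance pairs first and computes each character arithmetically (chr(ord('A')+c-10)) instead of consulting the dict, eliminating the letters list, the join, the reversal and the table.
import Mathlib
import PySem

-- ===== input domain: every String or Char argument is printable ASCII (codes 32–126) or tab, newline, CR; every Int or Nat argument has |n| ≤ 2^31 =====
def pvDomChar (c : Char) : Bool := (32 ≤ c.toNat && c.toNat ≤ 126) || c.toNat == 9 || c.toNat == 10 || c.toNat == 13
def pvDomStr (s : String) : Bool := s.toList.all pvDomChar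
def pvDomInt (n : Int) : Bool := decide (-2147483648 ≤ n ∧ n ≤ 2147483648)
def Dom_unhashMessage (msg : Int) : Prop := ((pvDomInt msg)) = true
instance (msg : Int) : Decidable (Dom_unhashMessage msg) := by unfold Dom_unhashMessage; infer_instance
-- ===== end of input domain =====

-- B replaces the append-then-reverse loop over the lookup table by a recursion on the quotient that
-- emits higher pairs first and computes each letter arithmetically from its code (no table, no reversal).

theorem pvFloordiv_lt (msg : Int) (h : 10 < msg) :
    (PySem.Int.floordiv msg 100).toNat < msg.toNat := by
  rw [PySem.Int.floordiv, Int.fdiv_eq_ediv]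
  rw [if_pos (Or.inl (by norm_num : (0:Int) ≤ 100))]
  omega

-- ===== PORT A =====
-- module-level constant letterHashmapReverse (values are the 1-char Python strings, as List Char)
def pvLetterMap : PySem.Dict Int (List Char) := PySem.Dict.ofList
  [(10, ['A']), (11, ['B']), (12, ['C']), (13, ['D']), (14, ['E']), (15, ['F']),
   (16, ['G']), (17, ['H']), (18, ['I']), (19, ['J']), (20, ['K']), (21, ['L']),
   (22, ['M']), (23, ['N']), (24, ['O']), (25, ['P']), (26, ['Q']), (27, ['R']),
   (28, ['S']), (29, ['T']), (30, ['U']), (31, ['V']), (32, ['W']), (33, ['X']),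
   (34, ['Y']), (35, ['Z']), (36, [' '])]

-- the 'while msg > 10' loop, carrying the 'letters' accumulator
def pvLoopA (msg : Int) (letters : List (List Char)) : List (List Char) :=
  if 10 < msg then
    pvLoopA (PySem.Int.floordiv msg 100)
      (if pvLetterMap.contains (PySem.Int.mod msg 100) then
        letters ++ [pvLetterMap.getD (PySem.Int.mod msg 100) []] else letters)
  else letters
termination_by msg.toNat
decreasing_by exact pvFloordiv_lt _ (by omega)

def unhashMessage (msg : Int) : String :=
  let letters := pvLoopA msg []
  let strn := PySem.Chars.join [] letters          -- ''.join(letters)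
  let strn := (PySem.Chars.slice? strn none none (-1)).getD []   -- strn[::-1]
  String.ofList strn

-- ===== PORT B =====
-- the if/elif/else computing ch from c = msg % 100 (chr(ord('A') + c - 10), ' ', or '')
def pvAltChar (c : Int) : List Char :=
  if 10 ≤ c ∧ c ≤ 35 then [Char.ofNat (65 + c - 10).toNat]
  else if c = 36 then [' ']
  else []

def pvAltChars (msg : Int) : List Char :=
  if msg ≤ 10 then []
  else pvAltChars (PySem.Int.floordiv msg 100) ++ pvAltChar (PySem.Int.mod msg 100)
termination_by msg.toNat
decreasing_by exact pvFloordiv_lt _ (by omega)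

def unhashMessage_alt (msg : Int) : String := String.ofList (pvAltChars msg)

-- ===== PRECONDITION & SPEC =====
def Spec_unhashMessage (msg : Int) (out : String) : Prop := out = unhashMessage_alt msg
instance (msg : Int) (out : String) : Decidable (Spec_unhashMessage msg out) := by unfold Spec_unhashMessage; infer_instance

-- ===== CLAIM (what is proved, stated in full; the proofs are below) =====
def Claim_equal_unhashMessage : Prop := ∀ (msg : Int), Dom_unhashMessage msg → Spec_unhashMessage msg (unhashMessage msg)

-- ===== LEMMAS AND PROOFS =====
theorem pvJoinNil (l : List (List Char)) : PySem.Chars.join [] l = l.flatten := by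
  induction l with
  | nil => rfl
  | cons x t ih =>
    cases t with
    | nil => simp [PySem.Chars.join, List.intercalate]
    | cons y u =>
      simp only [PySem.Chars.join, List.intercalate] at *
      rw [List.intersperse_cons₂]
      simp [ih.symm]

theorem pvLoopA_pos (msg : Int) (letters : List (List Char)) (h : 10 < msg) :
    pvLoopA msg letters = pvLoopA (PySem.Int.floordiv msg 100)
      (if pvLetterMap.contains (PySem.Int.mod msg 100) then
        letters ++ [pvLetterMap.getD (PySem.Int.mod msg 100) []] else letters) := by
  conv_lhs => rw [pvLoopA, if_pos h]

theorem pvLoopA_neg (msg : Int) (letters : List (List Char)) (h : ¬ 10 < msg) :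
    pvLoopA msg letters = letters := by
  rw [pvLoopA, if_neg h]

theorem pvAlt_neg (msg : Int) (h : msg ≤ 10) : pvAltChars msg = [] := by
  rw [pvAltChars, if_pos h]

theorem pvAlt_pos (msg : Int) (h : ¬ msg ≤ 10) :
    pvAltChars msg = pvAltChars (PySem.Int.floordiv msg 100)
      ++ pvAltChar (PySem.Int.mod msg 100) := by
  conv_lhs => rw [pvAltChars, if_neg h]

theorem pvLoopA_acc (n : Nat) (msg : Int) (hn : msg.toNat ≤ n) (letters : List (List Char)) :
    pvLoopA msg letters = letters ++ pvLoopA msg [] := by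
  induction n generalizing msg letters with
  | zero =>
    rw [pvLoopA_neg _ _ (by omega), pvLoopA_neg _ _ (by omega)]; simp
  | succ n ih =>
    by_cases h : 10 < msg
    · have hd : (PySem.Int.floordiv msg 100).toNat ≤ n := by
        have := pvFloordiv_lt msg h; omega
      rw [pvLoopA_pos _ _ h, pvLoopA_pos _ [] h]
      conv_rhs => rw [ih _ hd]
      conv_lhs => rw [ih _ hd]
      split_ifs <;> simp
    · rw [pvLoopA_neg _ _ h, pvLoopA_neg _ _ h]; simp

theorem pvMod_bounds (m : Int) : 0 ≤ PySem.Int.mod m 100 ∧ PySem.Int.mod m 100 < 100 := by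
  simp [PySem.Int.mod]
  constructor
  · exact Int.fmod_nonneg_of_pos m (by norm_num)
  · exact Int.fmod_lt_of_pos m (by norm_num)

-- the arithmetic character equals A's table lookup step (reversed), for every possible msg % 100
theorem pvPair_nat : ∀ n : Fin 100,
    (if pvLetterMap.contains ((n : Nat) : Int) then
      [pvLetterMap.getD ((n : Nat) : Int) []] else ([] : List (List Char))).flatten.reverse
    = pvAltChar ((n : Nat) : Int) := by
  set_option maxRecDepth 4000 in decide

theorem pvPair (c : Int) (h0 : 0 ≤ c) (h1 : c < 100) :
    (if pvLetterMap.contains c then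
      [pvLetterMap.getD c []] else ([] : List (List Char))).flatten.reverse = pvAltChar c := by
  have hc : c = ((c.toNat : Nat) : Int) := by omega
  rw [hc]
  exact pvPair_nat ⟨c.toNat, by omega⟩

theorem pvMain (n : Nat) (msg : Int) (hn : msg.toNat ≤ n) :
    (PySem.Chars.join [] (pvLoopA msg [])).reverse = pvAltChars msg := by
  induction n generalizing msg with
  | zero =>
    rw [pvLoopA_neg _ _ (by omega), pvAlt_neg _ (by omega)]
    rfl
  | succ n ih =>
    by_cases h : 10 < msg
    · have hd : (PySem.Int.floordiv msg 100).toNat ≤ n := by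
        have := pvFloordiv_lt msg h; omega
      rw [pvLoopA_pos _ _ h, pvLoopA_acc n _ hd, pvAlt_pos _ (by omega),
          pvJoinNil, List.flatten_append, List.reverse_append, ← pvJoinNil, ih _ hd]
      have hb := pvMod_bounds msg
      simp only [List.nil_append]
      rw [← pvPair (PySem.Int.mod msg 100) hb.1 hb.2]
    · rw [pvLoopA_neg _ _ h, pvAlt_neg _ (by omega)]
      rfl

-- ===== VERDICT (by name: the statement is the Claim_ definition above) =====
theorem unhashMessage_spec : Claim_equal_unhashMessage := by
  intro msg _
  show _ = _
  simp only [unhashMessage, unhashMessage_alt, PySem.Chars.slice?_eq_listSlice?, PySem.List.slice?_none_none_neg_one, Option.getD_some]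
  rw [pvMain msg.toNat msg le_rfl]
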